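-- pv_equiv track=rewrite | github.com/coltonsanders123/McGraw-Bot | bot_mcgraw.py | swap_back
-- ===== SOURCE A (Python) =====
-- def swap_back (arr, thing, end):
--     num = arr.index(thing)
--     counter = 0
--     while (num > end):
--         arr[num] = arr[num - 1]
--         arr[num - 1] = thing
--         num -= 1
--         counter += 1
--     return arr, counter
-- ===== SOURCE B (Python) =====
-- def swap_back(arr, thing, end):
--     num = arr.index(thing)
--     if num <= end:
--         return arr, 0
--     arr[end:num + 1] = [thing] + arr[end:num]
--     return arr, num - end
-- ===== Notes on version B (the rewrite author's own statement) =====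
-- stated objective: simpler
-- what changed: A's element-by-element swap loop with an incremented counter is replaced by one bulk slice rotation arr[end:num+1] = [thing] + arr[end:num] and the closed-form count num - end.
-- outside the precondition, e.g. on swap_back([1, 2, 3], 1, -1): A returns ([3, 2, 1], 1), B returns ([1, 2, 1, 3], 1)
import Mathlib
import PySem

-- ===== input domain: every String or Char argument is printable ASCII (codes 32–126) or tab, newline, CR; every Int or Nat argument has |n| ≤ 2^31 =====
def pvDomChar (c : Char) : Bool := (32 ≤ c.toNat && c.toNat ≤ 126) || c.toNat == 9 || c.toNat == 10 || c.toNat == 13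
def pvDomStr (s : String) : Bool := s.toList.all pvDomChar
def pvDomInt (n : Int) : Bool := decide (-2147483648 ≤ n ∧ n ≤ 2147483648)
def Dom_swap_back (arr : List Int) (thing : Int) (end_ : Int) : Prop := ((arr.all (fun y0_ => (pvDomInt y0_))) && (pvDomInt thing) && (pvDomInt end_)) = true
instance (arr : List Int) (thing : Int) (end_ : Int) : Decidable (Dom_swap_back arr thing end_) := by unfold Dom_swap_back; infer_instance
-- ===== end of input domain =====

-- B replaces A's element-by-element swap loop by one bulk slice rotation plus the
-- closed-form count num - end (simpler decomposition); both Pythons mutate arr in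
-- place to the same final list, and the equivalence proved is about the returned pair.

-- ===== PORT A =====
-- the while loop: while (num > end): arr[num] = arr[num-1]; arr[num-1] = thing; num -= 1; counter += 1
def swapLoopA (arr : List Int) (thing : Int) (num : Int) (end_ : Int) (counter : Int) : List Int × Int :=
  if h : num > end_ then
    let v := PySem.List.pyGetD arr (num - 1) 0
    let arr1 := PySem.List.pySetD arr num v
    let arr2 := PySem.List.pySetD arr1 (num - 1) thing
    swapLoopA arr2 thing (num - 1) end_ (counter + 1)
  else (arr, counter)
termination_by (num - end_).toNat
decreasing_by omega


def swap_back (arr : List Int) (thing : Int) (end_ : Int) : List Int × Int :=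
  match PySem.List.index? arr thing with
  | none => (arr, 0)   -- Python raises ValueError here; excluded by Pre_
  | some num => swapLoopA arr thing (num : Int) end_ 0

-- ===== PORT B =====
def swap_back_alt (arr : List Int) (thing : Int) (end_ : Int) : List Int × Int :=
  match PySem.List.index? arr thing with
  | none => (arr, 0)   -- Python raises ValueError here; excluded by Pre_
  | some num =>
    if (num : Int) ≤ end_ then (arr, 0)
    else
      -- arr[end:num+1] = [thing] + arr[end:num]  (CPython slice assignment: the target
      -- region is [s, max s t) with s, t the clamped bounds), then return arr, num - end
      let s := PySem.List.clampIdx arr.length end_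
      let t := PySem.List.clampIdx arr.length ((num : Int) + 1)
      (arr.take s ++ ([thing] ++ PySem.List.slice arr (some end_) (some (num : Int))) ++ arr.drop (max s t),
       (num : Int) - end_)

-- ===== PRECONDITION & SPEC =====
-- Pre_ excludes thing ∉ arr (Python's arr.index raises ValueError) and negative end_,
-- which is outside the natural domain of "move thing back to position end": there A's
-- arr[num-1] writes wrap around via Python's negative indices (an accidental rotation,
-- or an IndexError once end_ < -len(arr)).
def Pre_swap_back (arr : List Int) (thing : Int) (end_ : Int) : Prop :=
  thing ∈ arr ∧ 0 ≤ end_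
instance (arr : List Int) (thing : Int) (end_ : Int) : Decidable (Pre_swap_back arr thing end_) := by unfold Pre_swap_back; infer_instance

def pvWitness_swap_back : List Int × Int × Int := ([1, 2, 3, 4], 4, 1)

def Spec_swap_back (arr : List Int) (thing : Int) (end_ : Int) (out : List Int × Int) : Prop := out = swap_back_alt arr thing end_
instance (arr : List Int) (thing : Int) (end_ : Int) (out : List Int × Int) : Decidable (Spec_swap_back arr thing end_ out) := by unfold Spec_swap_back; infer_instance

-- ===== CLAIM (what is proved, stated in full; the proofs are below) =====
def Claim_equal_swap_back : Prop := ∀ (arr : List Int) (thing : Int) (end_ : Int), Dom_swap_back arr thing end_ → Pre_swap_back arr thing end_ → Spec_swap_back arr thing end_ (swap_back arr thing end_)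

-- ===== LEMMAS AND PROOFS =====

-- A's loop, started at index num = |u| + |v| of thing in u ++ v ++ thing :: s with
-- end = |u|, shifts v one place right, puts thing at |u|, and counts |v| iterations.
lemma swapLoopA_spec (k : Nat) : ∀ (u v s : List Int) (thing c : Int), v.length = k →
    swapLoopA (u ++ v ++ thing :: s) thing ((u.length : Int) + k) (u.length : Int) c
      = (u ++ thing :: (v ++ s), c + k) := by
  induction k with
  | zero =>
    intro u v s thing c hv
    rw [List.eq_nil_of_length_eq_zero hv]
    rw [swapLoopA]
    simp
  | succ k ih =>
    intro u v s thing c hv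
    rcases List.eq_nil_or_concat v with rfl | ⟨w, x, rfl⟩
    · simp at hv
    · simp only [List.concat_eq_append] at hv ⊢
      have hw : w.length = k := by simpa using hv
      rw [swapLoopA]
      rw [dif_pos (show ((u.length : Int) + ((k:Nat)+1:Nat) > (u.length : Int)) by push_cast; omega)]
      have harr : u ++ (w ++ [x]) ++ thing :: s = (u ++ w) ++ x :: (thing :: s) := by
        simp
      have h1 : ((u.length : Int) + (k:Nat)) = (((u ++ w).length : Nat) : Int) := by
        simp [hw]
      have h2 : ((u.length : Int) + ((k:Nat)+1:Nat)) = (((u ++ w).length + 1 : Nat) : Int) := by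
        simp [hw]; omega
      have hget : PySem.List.pyGetD (u ++ (w ++ [x]) ++ thing :: s) ((u.length : Int) + (k:Nat)) 0 = x := by
        rw [harr, h1, PySem.List.pyGetD_natCast]
        simp
      have hset1 : PySem.List.pySetD (u ++ (w ++ [x]) ++ thing :: s) ((u.length : Int) + ((k:Nat)+1:Nat)) x
          = (u ++ w) ++ x :: (x :: s) := by
        rw [harr, h2, PySem.List.pySetD_natCast]
        rw [List.set_append_right _ _ (by simp)]
        simp
      have hset2 : PySem.List.pySetD ((u ++ w) ++ x :: (x :: s)) ((u.length : Int) + (k:Nat)) thing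
          = u ++ (w ++ thing :: (x :: s)) := by
        rw [h1, PySem.List.pySetD_natCast]
        rw [List.set_append_right _ _ (by simp)]
        simp
      have hnum : ((u.length : Int) + ((k:Nat)+1:Nat)) - 1 = (u.length : Int) + (k:Nat) := by push_cast; omega
      simp only [hnum]
      simp only [hget]
      simp only [hset1]
      simp only [hset2]
      have := ih u w (x :: s) thing (c + 1) hw
      rw [show u ++ w ++ thing :: (x :: s) = u ++ (w ++ thing :: (x :: s)) by simp] at this
      rw [this]
      simp [Prod.ext_iff]
      ring

lemma swap_back_eq_alt (arr : List Int) (thing : Int) (end_ : Int)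
    (hmem : thing ∈ arr) (hend : 0 ≤ end_) :
    swap_back arr thing end_ = swap_back_alt arr thing end_ := by
  cases hidx : PySem.List.index? arr thing with
  | none =>
    rw [PySem.List.index?_eq_idxOf?] at hidx
    simp_all
  | some num =>
  simp only [swap_back, swap_back_alt, hidx]
  by_cases hle : (num : Int) ≤ end_
  · rw [if_pos hle, swapLoopA, dif_neg (by omega)]
  · rw [if_neg hle]
    obtain ⟨pre, suf, harr, hlen, -⟩ := (PySem.List.index?_eq_some_iff arr thing num).mp hidx
    set e := end_.toNat with he
    have hee : end_ = (e : Int) := by omega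
    have hek : e < num := by omega
    have hu : (pre.take e).length = e := by rw [List.length_take]; omega
    have hv : (pre.drop e).length = num - e := by rw [List.length_drop]; omega
    have hsplit : arr = pre.take e ++ pre.drop e ++ thing :: suf := by
      rw [List.take_append_drop]; exact harr
    -- A side
    have hA : swapLoopA arr thing (num : Int) end_ 0
        = (pre.take e ++ thing :: (pre.drop e ++ suf), 0 + ((num - e : Nat) : Int)) := by
      rw [hsplit, hee]
      have := swapLoopA_spec (num - e) (pre.take e) (pre.drop e) suf thing 0 hv
      rw [hu] at this
      rw [show ((num:Int)) = ((e:Int) + ((num - e : Nat):Int)) by omega] at *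
      exact this
    rw [hA]
    -- B side
    have hlenarr : arr.length = num + 1 + suf.length := by
      rw [harr]; simp [hlen]; omega
    have hclamp1 : PySem.List.clampIdx arr.length end_ = e := by
      rw [hee, PySem.List.clampIdx_natCast]; omega
    have hclamp2 : PySem.List.clampIdx arr.length ((num : Int) + 1) = num + 1 := by
      rw [show ((num : Int) + 1) = ((num + 1 : Nat) : Int) by push_cast; ring,
        PySem.List.clampIdx_natCast]
      omega
    have hmax : max e (num + 1) = num + 1 := by omega
    have htake : arr.take e = pre.take e := by
      rw [hsplit, List.append_assoc, List.take_left' hu]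
    have hs2 : PySem.List.slice arr (some end_) (some (num : Int)) = pre.drop e := by
      rw [hee, PySem.List.slice_toNat _ (by positivity) (by positivity), Int.toNat_natCast, Int.toNat_natCast]
      rw [hsplit, List.append_assoc]
      rw [List.drop_left' hu]
      rw [List.take_left' (by omega)]
    have hdrop : arr.drop (num + 1) = suf := by
      rw [hsplit]
      rw [show pre.take e ++ pre.drop e ++ thing :: suf = (pre.take e ++ pre.drop e ++ [thing]) ++ suf by simp]
      rw [List.drop_left' (by simp; omega)]
    simp only [hclamp1, hclamp2, hmax, htake, hs2, hdrop]
    simp [Prod.ext_iff]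
    omega

-- ===== VERDICT (by name: the statement is the Claim_ definition above) =====
theorem swap_back_spec : Claim_equal_swap_back := by
  intro arr thing end_ _ hpre
  exact swap_back_eq_alt arr thing end_ hpre.1 hpre.2
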